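-- pv_equiv track=rewrite | github.com/Roger1611/ai-context-memory-system | scripts/generate_dev_snapshot.py | _dedupe_file_roles
-- ===== SOURCE A (Python) =====
-- def _path_from_file_role(content):
--     path, _, _ = content.partition(" - ")
--     return path.strip()
--
-- def _dedupe_file_roles(file_roles):
--     preferred = {}
--     order = []
--
--     for packet in file_roles:
--         path = _path_from_file_role(packet.get("content", ""))
--         if not path:
--             continue
--
--         key = path.split("/")[-1]
--         current = preferred.get(key)
--         if current is None:
--             preferred[key] = packet
--             order.append(key)
--             continue
--
--         current_path = _path_from_file_role(current.get("content", ""))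
--         if "/" in path and "/" not in current_path:
--             preferred[key] = packet
--
--     return [preferred[key] for key in order]
-- ===== SOURCE B (Python) =====
-- def _path_from_file_role(content):
--     path, _, _ = content.partition(" - ")
--     return path.strip()
--
--
-- def _dedupe_file_roles(file_roles):
--     # Pass 1: group packets by basename key (insertion order of first sight).
--     groups = {}
--     for packet in file_roles:
--         path = _path_from_file_role(packet.get("content", ""))
--         if not path:
--             continue
--         groups.setdefault(path.split("/")[-1], []).append(packet)
--     # Pass 2: per group pick the first packet whose path has a slash, else the first packet.
--     return [
--         next(
--             (p for p in g if "/" in _path_from_file_role(p.get("content", ""))),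
--             g[0],
--         )
--         for g in groups.values()
--     ]
-- ===== Notes on version B (the rewrite author's own statement) =====
-- stated objective: alternative
-- what changed: Replaces A's single-pass incremental 'replace current if new path has a slash and current does not' dict of representatives with a group-then-reduce: pass 1 groups all packets by basename key in first-seen order, pass 2 picks per group the first packet whose path contains '/', else the group's first packet.
import Mathlib
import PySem

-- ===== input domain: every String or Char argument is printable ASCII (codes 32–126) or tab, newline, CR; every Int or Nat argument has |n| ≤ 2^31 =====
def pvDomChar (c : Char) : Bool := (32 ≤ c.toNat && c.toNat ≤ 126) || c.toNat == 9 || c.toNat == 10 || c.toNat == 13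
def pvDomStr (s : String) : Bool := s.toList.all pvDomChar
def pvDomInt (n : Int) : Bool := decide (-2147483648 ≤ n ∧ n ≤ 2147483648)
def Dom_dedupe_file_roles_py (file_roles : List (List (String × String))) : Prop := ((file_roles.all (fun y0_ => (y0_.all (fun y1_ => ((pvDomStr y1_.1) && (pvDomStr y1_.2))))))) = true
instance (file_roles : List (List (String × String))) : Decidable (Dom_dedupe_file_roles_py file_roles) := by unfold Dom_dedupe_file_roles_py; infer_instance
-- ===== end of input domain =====

-- B is an alternative decomposition (group-by-key then reduce each group) of A's
-- single-pass "replace if better" dedupe; same cost, return value proved equal.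

-- ===== PORT A =====
-- _path_from_file_role: content.partition(" - ")[0].strip()
-- (s.partition(sep)[0] = s.split(sep, 1)[0]; ported via PySem.Str.splitMax?, exact)
def pvPathFromFileRole (content : String) : String :=
  PySem.Str.strip (((PySem.Str.splitMax? content " - " 1).getD []).headD "")

-- packet.get("content", "")
def pvGetContent (packet : List (String × String)) : String :=
  (PySem.Dict.mk packet).getD "content" ""

-- path.split("/")[-1]  (split list is always nonempty, so [-1] is getLastD)
def pvBaseKey (path : String) : String :=
  (((PySem.Str.split? path "/").getD []).getLastD "")

def dedupe_file_roles_py (file_roles : List (List (String × String))) : List (List (String × String)) :=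
  let st := file_roles.foldl
    (fun (st : PySem.Dict String (List (String × String)) × List String) packet =>
      let path := pvPathFromFileRole (pvGetContent packet)
      if path = "" then st
      else
        let key := pvBaseKey path
        match st.1.get? key with
        | none => (st.1.insert key packet, st.2 ++ [key])
        | some current =>
          let current_path := pvPathFromFileRole (pvGetContent current)
          if PySem.Str.isIn "/" path && !PySem.Str.isIn "/" current_path then
            (st.1.insert key packet, st.2)
          else st)
    (PySem.Dict.empty, [])
  st.2.map (fun key => (st.1.get? key).getD [])

-- ===== PORT B =====
-- '/' in _path_from_file_role(p.get("content", ""))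
def pvHasSlash (p : List (String × String)) : Bool :=
  PySem.Str.isIn "/" (pvPathFromFileRole (pvGetContent p))

def dedupe_file_roles_py_alt (file_roles : List (List (String × String))) : List (List (String × String)) :=
  -- pass 1: groups.setdefault(key, []).append(packet)  (= modify with default [])
  let groups := file_roles.foldl
    (fun (d : PySem.Dict String (List (List (String × String)))) packet =>
      let path := pvPathFromFileRole (pvGetContent packet)
      if path = "" then d
      else d.modify (pvBaseKey path) [] (· ++ [packet]))
    PySem.Dict.empty
  -- pass 2: next((p for p in g if '/' in path(p)), g[0]) for g in groups.values()
  groups.values.map (fun g => (g.find? pvHasSlash).getD (g.headD []))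

-- ===== PRECONDITION & SPEC =====
def Spec_dedupe_file_roles_py (file_roles : List (List (String × String))) (out : List (List (String × String))) : Prop := out = dedupe_file_roles_py_alt file_roles
instance (file_roles : List (List (String × String))) (out : List (List (String × String))) : Decidable (Spec_dedupe_file_roles_py file_roles out) := by unfold Spec_dedupe_file_roles_py; infer_instance

-- ===== CLAIM (what is proved, stated in full; the proofs are below) =====
def Claim_equal_dedupe_file_roles_py : Prop := ∀ (file_roles : List (List (String × String))), Dom_dedupe_file_roles_py file_roles → Spec_dedupe_file_roles_py file_roles (dedupe_file_roles_py file_roles)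

-- ===== LEMMAS AND PROOFS =====

-- named copies of the two fold bodies (definitionally equal to the ports' lambdas)
def pvStepA (st : PySem.Dict String (List (String × String)) × List String)
    (packet : List (String × String)) :
    PySem.Dict String (List (String × String)) × List String :=
  let path := pvPathFromFileRole (pvGetContent packet)
  if path = "" then st
  else
    let key := pvBaseKey path
    match st.1.get? key with
    | none => (st.1.insert key packet, st.2 ++ [key])
    | some current =>
      let current_path := pvPathFromFileRole (pvGetContent current)
      if PySem.Str.isIn "/" path && !PySem.Str.isIn "/" current_path then
        (st.1.insert key packet, st.2)
      else st

def pvStepB (d : PySem.Dict String (List (List (String × String))))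
    (packet : List (String × String)) :
    PySem.Dict String (List (List (String × String))) :=
  let path := pvPathFromFileRole (pvGetContent packet)
  if path = "" then d
  else d.modify (pvBaseKey path) [] (· ++ [packet])

-- the per-group reduction of B
def pvSel (g : List (List (String × String))) : List (String × String) :=
  (g.find? pvHasSlash).getD (g.headD [])

-- the invariant tying A's (preferred, order) to B's groups dict
def pvInv (pref : PySem.Dict String (List (String × String)))
    (order : List String)
    (grp : PySem.Dict String (List (List (String × String)))) : Prop :=
  order = grp.keys ∧ grp.keys.Nodup ∧
  (∀ k, pref.contains k = grp.contains k) ∧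
  (∀ k, grp.contains k = true → grp.getD k [] ≠ [] ∧ pref.get? k = some (pvSel (grp.getD k [])))

theorem pvSel_append (g : List (List (String × String))) (p : List (String × String)) (hg : g ≠ []) :
    pvSel (g ++ [p]) =
      (if pvHasSlash p && !pvHasSlash (pvSel g) then p else pvSel g) := by
  cases g with
  | nil => exact absurd rfl hg
  | cons a t =>
    unfold pvSel
    rw [List.find?_append]
    cases hf : (a :: t).find? pvHasSlash with
    | some x =>
      have hx : pvHasSlash x = true := List.find?_some hf
      simp [hx]
    | none =>
      have hh : pvHasSlash a = false := by
        have := List.find?_eq_none.mp hf a (by simp)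
        simpa using this
      cases hp : pvHasSlash p with
      | true => simp [List.find?, hp, hh]
      | false => simp [List.find?, hp, hh]

theorem pvStep_inv
    (pref : PySem.Dict String (List (String × String)))
    (order : List String)
    (grp : PySem.Dict String (List (List (String × String))))
    (packet : List (String × String))
    (h : pvInv pref order grp) :
    pvInv (pvStepA (pref, order) packet).1 (pvStepA (pref, order) packet).2
      (pvStepB grp packet) := by
  obtain ⟨hord, hnd, hc, hv⟩ := h
  by_cases hpath : pvPathFromFileRole (pvGetContent packet) = ""
  · simp only [pvStepA, pvStepB, hpath, if_pos]
    exact ⟨hord, hnd, hc, hv⟩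
  · simp only [pvStepA, pvStepB, PySem.Dict.modify, hpath, ite_false]
    generalize pvBaseKey (pvPathFromFileRole (pvGetContent packet)) = key
    cases hA : pref.get? key with
    | none =>
      have hcont : grp.contains key = false := by
        rw [← hc]
        exact (PySem.Dict.get?_eq_none_iff_contains pref key).mp hA
      have hgd : grp.getD key [] = [] := PySem.Dict.getD_of_not_contains _ _ hcont
      have hmem : key ∉ grp.keys := by
        intro hm
        rw [(PySem.Dict.contains_iff_mem_keys grp key).mpr hm] at hcont
        cases hcont
      refine ⟨?_, ?_, ?_, ?_⟩
      · rw [hord, PySem.Dict.keys_insert_of_not_contains _ _ hcont]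
      · rw [PySem.Dict.keys_insert_of_not_contains _ _ hcont]
        simp [List.nodup_append, hnd]
        intro a ha hak
        exact hmem (hak ▸ ha)
      · intro k
        rw [PySem.Dict.contains_insert, PySem.Dict.contains_insert, hc]
      · intro k hk
        rw [PySem.Dict.contains_insert] at hk
        by_cases hkk : k = key
        · subst hkk
          refine ⟨?_, ?_⟩
          · rw [PySem.Dict.getD_insert]
            simp [hgd]
          · rw [PySem.Dict.get?_insert_self, PySem.Dict.getD_insert]
            simp only [hgd, List.nil_append]
            simp [pvSel]
            cases hps : pvHasSlash packet <;> simp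
        · have hk' : grp.contains k = true := by
            simpa [hkk] using hk
          obtain ⟨hne2, hval2⟩ := hv k hk'
          refine ⟨?_, ?_⟩
          · rw [PySem.Dict.getD_insert]
            simp [hkk, hne2]
          · rw [PySem.Dict.get?_insert_of_ne _ _ hkk, PySem.Dict.getD_insert]
            simp [hkk, hval2]
    | some current =>
      have hcont : grp.contains key = true := by
        rw [← hc]
        by_contra hcf
        rw [(PySem.Dict.get?_eq_none_iff_contains pref key).mpr
          (Bool.eq_false_iff.mpr hcf)] at hA
        cases hA
      obtain ⟨hne, hval⟩ := hv key hcont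
      have hcur : current = pvSel (grp.getD key []) := by
        rw [hA] at hval
        exact Option.some.inj hval
      have hselapp := pvSel_append (grp.getD key []) packet hne
      have hkeys : (grp.insert key (grp.getD key [] ++ [packet])).keys = grp.keys :=
        PySem.Dict.keys_insert_of_contains _ _ hcont
      by_cases hrepl : (PySem.Str.isIn "/" (pvPathFromFileRole (pvGetContent packet))
          && !PySem.Str.isIn "/" (pvPathFromFileRole (pvGetContent current))) = true
      · simp only [hrepl, if_true]
        refine ⟨?_, ?_, ?_, ?_⟩
        · rw [hord, hkeys]
        · rw [hkeys]; exact hnd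
        · intro k
          rw [PySem.Dict.contains_insert, PySem.Dict.contains_insert, hc]
        · intro k hk
          rw [PySem.Dict.contains_insert] at hk
          by_cases hkk : k = key
          · subst hkk
            refine ⟨?_, ?_⟩
            · rw [PySem.Dict.getD_insert]
              simp [hne]
            · rw [PySem.Dict.get?_insert_self, PySem.Dict.getD_insert, if_pos rfl]
              have hb : (pvHasSlash packet && !pvHasSlash (pvSel (grp.getD k []))) = true := by
                rw [hcur] at hrepl
                simpa [pvHasSlash] using hrepl
              rw [hselapp, if_pos hb]
          · have hk' : grp.contains k = true := by simpa [hkk] using hk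
            obtain ⟨hne2, hval2⟩ := hv k hk'
            refine ⟨?_, ?_⟩
            · rw [PySem.Dict.getD_insert]
              simp [hkk, hne2]
            · rw [PySem.Dict.get?_insert_of_ne _ _ hkk, PySem.Dict.getD_insert]
              simp [hkk, hval2]
      · simp only [Bool.not_eq_true] at hrepl
        simp only [hrepl, Bool.false_eq_true, if_false]
        refine ⟨?_, ?_, ?_, ?_⟩
        · rw [hord, hkeys]
        · rw [hkeys]; exact hnd
        · intro k
          rw [PySem.Dict.contains_insert, hc]
          by_cases hkk : k = key
          · subst hkk; simp [hcont]
          · simp [hkk]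
        · intro k hk
          rw [PySem.Dict.contains_insert] at hk
          by_cases hkk : k = key
          · subst hkk
            refine ⟨?_, ?_⟩
            · rw [PySem.Dict.getD_insert]
              simp [hne]
            · rw [PySem.Dict.getD_insert, if_pos rfl]
              have hb : (pvHasSlash packet && !pvHasSlash (pvSel (grp.getD k []))) = false := by
                rw [hcur] at hrepl
                simpa [pvHasSlash] using hrepl
              rw [hselapp, if_neg (by simp [hb]), hA, hcur]
          · have hk' : grp.contains k = true := by simpa [hkk] using hk
            obtain ⟨hne2, hval2⟩ := hv k hk'
            refine ⟨?_, ?_⟩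
            · rw [PySem.Dict.getD_insert]
              simp [hkk, hne2]
            · rw [PySem.Dict.getD_insert]
              simp [hkk, hval2]

theorem pvFold_inv (l : List (List (String × String)))
    (pref : PySem.Dict String (List (String × String)))
    (order : List String)
    (grp : PySem.Dict String (List (List (String × String))))
    (h : pvInv pref order grp) :
    pvInv (l.foldl pvStepA (pref, order)).1 (l.foldl pvStepA (pref, order)).2
      (l.foldl pvStepB grp) := by
  induction l generalizing pref order grp with
  | nil => exact h
  | cons a t ih =>
    simp only [List.foldl_cons]
    have hstep := pvStep_inv pref order grp a h
    have := ih (pvStepA (pref, order) a).1 (pvStepA (pref, order) a).2 (pvStepB grp a) hstep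
    simpa using this

theorem pvMain (l : List (List (String × String))) :
    (l.foldl pvStepA (PySem.Dict.empty, [])).2.map
      (fun key => (((l.foldl pvStepA (PySem.Dict.empty, [])).1.get? key).getD [])) =
    (l.foldl pvStepB PySem.Dict.empty).values.map
      (fun g => (g.find? pvHasSlash).getD (g.headD [])) := by
  have hinit : pvInv PySem.Dict.empty [] PySem.Dict.empty := by
    refine ⟨by simp [PySem.Dict.keys_empty], by simp [PySem.Dict.keys_empty], ?_, ?_⟩
    · intro k; rfl
    · intro k hk
      rw [PySem.Dict.contains_empty] at hk
      cases hk
  obtain ⟨hord, hnd, hc, hv⟩ := pvFold_inv l PySem.Dict.empty [] PySem.Dict.empty hinit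
  rw [PySem.Dict.values_eq_map_keys _ hnd [], List.map_map, hord]
  apply List.map_congr_left
  intro k hk
  have hcont : (l.foldl pvStepB PySem.Dict.empty).contains k = true :=
    (PySem.Dict.contains_iff_mem_keys _ k).mpr hk
  obtain ⟨hne, hval⟩ := hv k hcont
  rw [hval]
  rfl

-- ===== VERDICT (by name: the statement is the Claim_ definition above) =====
theorem dedupe_file_roles_py_spec : Claim_equal_dedupe_file_roles_py := by
  intro file_roles _
  show dedupe_file_roles_py file_roles = dedupe_file_roles_py_alt file_roles
  exact pvMain file_roles
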